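-- pv_equiv track=rewrite | github.com/amasse-1/class_work | assignment4.py | smallest_gap
-- ===== SOURCE A (Python) =====
-- def smallest_gap(array): #input array
--     smallest = 1000
--     for i in array:
--         for j in array:
--             if(i > j):
--                 x = i - j
--                 if(x < smallest):
--                     smallest = x
--             elif(j > i):
--                 x = j - i
--                 if(x < smallest):
--                     smallest = x
--     return smallest # output
-- ===== SOURCE B (Python) =====
-- def smallest_gap(array):
--     # Sort once; the minimum positive pairwise difference is achieved between
--     # adjacent elements of the sorted list. 1000 is the cap A starts from.
--     s = sorted(array)
--     best = 1000
--     for u, v in zip(s, s[1:]):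
--         d = v - u
--         if 0 < d < best:
--             best = d
--     return best
-- ===== Notes on version B (the rewrite author's own statement) =====
-- stated objective: faster
-- what changed: Replaces the quadratic all-pairs scan by sort-then-single-pass over adjacent differences of the sorted list (min positive pairwise difference is attained by an adjacent sorted pair), keeping the 1000 cap.
import Mathlib
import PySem

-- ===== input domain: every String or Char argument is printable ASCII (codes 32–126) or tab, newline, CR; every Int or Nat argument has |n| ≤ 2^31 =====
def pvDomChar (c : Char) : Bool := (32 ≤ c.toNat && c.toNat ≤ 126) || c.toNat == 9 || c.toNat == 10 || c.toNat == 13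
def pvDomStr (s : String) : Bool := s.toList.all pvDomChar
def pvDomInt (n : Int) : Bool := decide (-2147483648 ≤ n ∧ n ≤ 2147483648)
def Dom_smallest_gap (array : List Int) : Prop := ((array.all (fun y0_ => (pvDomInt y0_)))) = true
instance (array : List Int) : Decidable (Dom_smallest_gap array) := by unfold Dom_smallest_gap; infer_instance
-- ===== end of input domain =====

-- B replaces A's quadratic all-pairs scan by sort + one pass over adjacent
-- differences of the sorted list (same value, including the 1000 cap).

-- ===== PORT A =====
-- inner-loop body of A: update 'smallest' from the pair (i, j)
def innerStep (i smallest j : Int) : Int :=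
  if i > j then (if i - j < smallest then i - j else smallest)
  else if j > i then (if j - i < smallest then j - i else smallest)
  else smallest

-- outer-loop body of A: the whole inner 'for j in array' loop
def outerStep (arr : List Int) (smallest i : Int) : Int :=
  arr.foldl (innerStep i) smallest

def smallest_gap (array : List Int) : Int :=
  array.foldl (outerStep array) 1000

-- ===== PORT B =====
-- loop body of B over an adjacent pair (u, v) of the sorted list
def altStep (best : Int) (uv : Int × Int) : Int :=
  if 0 < uv.2 - uv.1 ∧ uv.2 - uv.1 < best then uv.2 - uv.1 else best

def smallest_gap_alt (array : List Int) : Int :=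
  let s := PySem.List.sorted array (fun x => x) false
  (s.zip s.tail).foldl altStep 1000

-- ===== PRECONDITION & SPEC =====
def Spec_smallest_gap (array : List Int) (out : Int) : Prop := out = smallest_gap_alt array
instance (array : List Int) (out : Int) : Decidable (Spec_smallest_gap array out) := by unfold Spec_smallest_gap; infer_instance

-- ===== CLAIM (what is proved, stated in full; the proofs are below) =====
def Claim_equal_smallest_gap : Prop := ∀ (array : List Int), Dom_smallest_gap array → Spec_smallest_gap array (smallest_gap array)

-- ===== LEMMAS AND PROOFS =====

-- the common characterisation: r = min (1000, min positive pairwise difference)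
def GapP (array : List Int) (r : Int) : Prop :=
  r ≤ 1000 ∧
  (∀ a b : Int, a ∈ array → b ∈ array → a < b → r ≤ b - a) ∧
  (r = 1000 ∨ ∃ a b : Int, a ∈ array ∧ b ∈ array ∧ a < b ∧ b - a = r)

lemma gapP_unique {array : List Int} {r r' : Int}
    (h : GapP array r) (h' : GapP array r') : r = r' := by
  obtain ⟨h1, h2, h3⟩ := h
  obtain ⟨h1', h2', h3'⟩ := h'
  have hle : r ≤ r' := by
    rcases h3' with rfl | ⟨a, b, ha, hb, hab, rfl⟩
    · exact h1
    · exact h2 a b ha hb hab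
  have hge : r' ≤ r := by
    rcases h3 with rfl | ⟨a, b, ha, hb, hab, rfl⟩
    · exact h1'
    · exact h2' a b ha hb hab
  omega

-- ---- A-side fold lemmas ----

lemma innerStep_le (i s j : Int) : innerStep i s j ≤ s := by
  unfold innerStep; split_ifs <;> omega

lemma innerFold_le : ∀ (l : List Int) (i s : Int), l.foldl (innerStep i) s ≤ s := by
  intro l
  induction l with
  | nil => intro i s; simp
  | cons j t ih =>
    intro i s
    calc (j :: t).foldl (innerStep i) s = t.foldl (innerStep i) (innerStep i s j) := rfl
      _ ≤ innerStep i s j := ih i _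
      _ ≤ s := innerStep_le i s j

lemma innerFold_le_diff : ∀ (l : List Int) (i s a : Int), a ∈ l → a < i →
    l.foldl (innerStep i) s ≤ i - a := by
  intro l
  induction l with
  | nil => intro i s a ha; simp at ha
  | cons j t ih =>
    intro i s a ha hai
    rcases List.mem_cons.1 ha with rfl | hat
    · have h1 : innerStep i s a ≤ i - a := by unfold innerStep; split_ifs <;> omega
      calc (a :: t).foldl (innerStep i) s = t.foldl (innerStep i) (innerStep i s a) := rfl
        _ ≤ innerStep i s a := innerFold_le t i _
        _ ≤ i - a := h1
    · exact ih i _ a hat hai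

lemma innerFold_cases : ∀ (l : List Int) (i s : Int),
    l.foldl (innerStep i) s = s ∨
    ∃ a ∈ l, (a < i ∧ l.foldl (innerStep i) s = i - a) ∨
             (i < a ∧ l.foldl (innerStep i) s = a - i) := by
  intro l
  induction l with
  | nil => intro i s; left; rfl
  | cons j t ih =>
    intro i s
    have hstep : innerStep i s j = s ∨ (j < i ∧ innerStep i s j = i - j) ∨
        (i < j ∧ innerStep i s j = j - i) := by
      unfold innerStep; split_ifs <;> omega
    have hfold : (j :: t).foldl (innerStep i) s = t.foldl (innerStep i) (innerStep i s j) := rfl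
    rcases ih i (innerStep i s j) with heq | ⟨a, hat, hcase⟩
    · rcases hstep with h | ⟨hji, h⟩ | ⟨hij, h⟩
      · left; rw [hfold, heq, h]
      · right; exact ⟨j, List.mem_cons_self, Or.inl ⟨hji, by rw [hfold, heq, h]⟩⟩
      · right; exact ⟨j, List.mem_cons_self, Or.inr ⟨hij, by rw [hfold, heq, h]⟩⟩
    · right; exact ⟨a, List.mem_cons_of_mem j hat, by rw [hfold]; exact hcase⟩

lemma outerFold_le : ∀ (l arr : List Int) (s : Int), l.foldl (outerStep arr) s ≤ s := by
  intro l
  induction l with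
  | nil => intro arr s; simp
  | cons i t ih =>
    intro arr s
    calc (i :: t).foldl (outerStep arr) s = t.foldl (outerStep arr) (outerStep arr s i) := rfl
      _ ≤ outerStep arr s i := ih arr _
      _ ≤ s := innerFold_le arr i s

lemma outerFold_le_diff : ∀ (l arr : List Int) (s a b : Int), b ∈ l → a ∈ arr → a < b →
    l.foldl (outerStep arr) s ≤ b - a := by
  intro l
  induction l with
  | nil => intro arr s a b hb; simp at hb
  | cons i t ih =>
    intro arr s a b hb ha hab
    rcases List.mem_cons.1 hb with rfl | hbt
    · calc (b :: t).foldl (outerStep arr) s = t.foldl (outerStep arr) (outerStep arr s b) := rfl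
        _ ≤ outerStep arr s b := outerFold_le t arr _
        _ ≤ b - a := innerFold_le_diff arr b s a ha hab
    · exact ih arr _ a b hbt ha hab

lemma outerFold_cases : ∀ (l arr : List Int) (s : Int),
    l.foldl (outerStep arr) s = s ∨
    ∃ i ∈ l, ∃ a ∈ arr, (a < i ∧ l.foldl (outerStep arr) s = i - a) ∨
                        (i < a ∧ l.foldl (outerStep arr) s = a - i) := by
  intro l
  induction l with
  | nil => intro arr s; left; rfl
  | cons i t ih =>
    intro arr s
    have hfold : (i :: t).foldl (outerStep arr) s = t.foldl (outerStep arr) (outerStep arr s i) := rfl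
    rcases ih arr (outerStep arr s i) with heq | ⟨i', hi't, a, haarr, hcase⟩
    · rcases innerFold_cases arr i s with h | ⟨a, haarr, hcase⟩
      · left; rw [hfold, heq]; exact h
      · right
        refine ⟨i, List.mem_cons_self, a, haarr, ?_⟩
        rw [hfold, heq]
        unfold outerStep
        exact hcase
    · right; exact ⟨i', List.mem_cons_of_mem i hi't, a, haarr, by rw [hfold]; exact hcase⟩

lemma gapP_A (array : List Int) : GapP array (smallest_gap array) := by
  unfold smallest_gap
  refine ⟨outerFold_le array array 1000, ?_, ?_⟩
  · intro a b ha hb hab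
    exact outerFold_le_diff array array 1000 a b hb ha hab
  · rcases outerFold_cases array array 1000 with h | ⟨i, hi, a, ha, hcase⟩
    · left; exact h
    · right
      rcases hcase with ⟨hai, heq⟩ | ⟨hia, heq⟩
      · exact ⟨a, i, ha, hi, hai, by omega⟩
      · exact ⟨i, a, hi, ha, hia, by omega⟩

-- ---- B-side fold lemmas ----

lemma altFold_le : ∀ (ps : List (Int × Int)) (s : Int), ps.foldl altStep s ≤ s := by
  intro ps
  induction ps with
  | nil => intro s; simp
  | cons p t ih =>
    intro s
    have h : altStep s p ≤ s := by unfold altStep; split_ifs <;> omega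
    calc (p :: t).foldl altStep s = t.foldl altStep (altStep s p) := rfl
      _ ≤ altStep s p := ih _
      _ ≤ s := h

lemma altFold_le_diff : ∀ (ps : List (Int × Int)) (s : Int) (u v : Int),
    (u, v) ∈ ps → u < v → ps.foldl altStep s ≤ v - u := by
  intro ps
  induction ps with
  | nil => intro s u v h; simp at h
  | cons p t ih =>
    intro s u v hmem huv
    rcases List.mem_cons.1 hmem with rfl | hmt
    · have h : altStep s (u, v) ≤ v - u := by unfold altStep; split_ifs <;> omega
      calc ((u, v) :: t).foldl altStep s = t.foldl altStep (altStep s (u, v)) := rfl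
        _ ≤ altStep s (u, v) := altFold_le t _
        _ ≤ v - u := h
    · exact ih _ u v hmt huv

lemma altFold_cases : ∀ (ps : List (Int × Int)) (s : Int),
    ps.foldl altStep s = s ∨
    ∃ u v : Int, (u, v) ∈ ps ∧ u < v ∧ ps.foldl altStep s = v - u := by
  intro ps
  induction ps with
  | nil => intro s; left; rfl
  | cons p t ih =>
    intro s
    have hfold : (p :: t).foldl altStep s = t.foldl altStep (altStep s p) := rfl
    have hstep : altStep s p = s ∨ (p.1 < p.2 ∧ altStep s p = p.2 - p.1) := by
      unfold altStep; split_ifs with h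
      · right; exact ⟨by omega, rfl⟩
      · left; rfl
    rcases ih (altStep s p) with heq | ⟨u, v, hmem, huv, heq⟩
    · rcases hstep with h | ⟨hlt, h⟩
      · left; rw [hfold, heq, h]
      · right; exact ⟨p.1, p.2, by simp, hlt, by rw [hfold, heq, h]⟩
    · right; exact ⟨u, v, List.mem_cons_of_mem p hmem, huv, by rw [hfold]; exact heq⟩

-- in a ≤-sorted list containing a < b, some adjacent pair has a positive gap ≤ b - a
lemma chain_adj : ∀ (s : List Int), s.Pairwise (fun a b => a ≤ b) →
    ∀ a b : Int, a ∈ s → b ∈ s → a < b →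
    ∃ u v : Int, (u, v) ∈ s.zip s.tail ∧ u < v ∧ v - u ≤ b - a := by
  intro s
  induction s with
  | nil => intro _ a b ha; simp at ha
  | cons x t ih =>
    intro hp a b ha hb hab
    rw [List.pairwise_cons] at hp
    obtain ⟨hx, hpt⟩ := hp
    cases t with
    | nil =>
      simp at ha hb; omega
    | cons y t' =>
      have hzip : ((x :: y :: t').zip (x :: y :: t').tail)
          = (x, y) :: ((y :: t').zip (y :: t').tail) := rfl
      by_cases hxy : x < y
      · rcases List.mem_cons.1 ha with rfl | hat
        · -- a = x; b ∈ y :: t' and y ≤ b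
          have hbt : b ∈ y :: t' := by
            rcases List.mem_cons.1 hb with rfl | h
            · omega
            · exact h
          have hyb : y ≤ b := by
            rcases List.mem_cons.1 hbt with rfl | h
            · omega
            · exact (List.pairwise_cons.1 hpt).1 b h
          exact ⟨a, y, by rw [hzip]; exact List.mem_cons_self, hxy, by omega⟩
        · -- a ∈ t; then b ∈ t too (b = x is impossible)
          have hbt : b ∈ y :: t' := by
            rcases List.mem_cons.1 hb with rfl | h
            · have := hx a hat; omega
            · exact h
          obtain ⟨u, v, hmem, huv, hle⟩ := ih hpt a b hat hbt hab
          exact ⟨u, v, by rw [hzip]; exact List.mem_cons_of_mem _ hmem, huv, hle⟩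
      · -- y ≤ x and x ≤ y, so x = y: push both memberships into t
        have hxey : x = y := le_antisymm (hx y List.mem_cons_self) (by omega)
        have hat : a ∈ y :: t' := by
          rcases List.mem_cons.1 ha with rfl | h
          · rw [hxey]; exact List.mem_cons_self
          · exact h
        have hbt : b ∈ y :: t' := by
          rcases List.mem_cons.1 hb with rfl | h
          · rw [hxey]; exact List.mem_cons_self
          · exact h
        obtain ⟨u, v, hmem, huv, hle⟩ := ih hpt a b hat hbt hab
        exact ⟨u, v, by rw [hzip]; exact List.mem_cons_of_mem _ hmem, huv, hle⟩

lemma gapP_B (array : List Int) : GapP array (smallest_gap_alt array) := by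
  unfold smallest_gap_alt
  set s := PySem.List.sorted array (fun x => x) false with hs
  have hperm : ∀ x : Int, x ∈ s ↔ x ∈ array := by
    intro x; rw [hs]; exact PySem.List.mem_sorted array (fun x => x) false x
  have hpw : s.Pairwise (fun a b => a ≤ b) := by
    rw [hs]; exact PySem.List.sorted_pairwise array (fun x => x)
  refine ⟨altFold_le _ 1000, ?_, ?_⟩
  · intro a b ha hb hab
    obtain ⟨u, v, hmem, huv, hle⟩ :=
      chain_adj s hpw a b ((hperm a).2 ha) ((hperm b).2 hb) hab
    calc (s.zip s.tail).foldl altStep 1000 ≤ v - u := altFold_le_diff _ 1000 u v hmem huv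
      _ ≤ b - a := hle
  · rcases altFold_cases (s.zip s.tail) 1000 with h | ⟨u, v, hmem, huv, heq⟩
    · left; exact h
    · right
      have hus : u ∈ s := (List.of_mem_zip hmem).1
      have hvs : v ∈ s := List.mem_of_mem_tail (List.of_mem_zip hmem).2
      exact ⟨u, v, (hperm u).1 hus, (hperm v).1 hvs, huv, heq.symm⟩

-- ===== VERDICT (by name: the statement is the Claim_ definition above) =====
theorem smallest_gap_spec : Claim_equal_smallest_gap := by
  intro array _
  unfold Spec_smallest_gap
  exact gapP_unique (gapP_A array) (gapP_B array)
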